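-- pv_equiv track=rewrite | github.com/shenhanc78/llvm-project | experiments/scripts/mysql_benchmarks/perf_analyzer.py | batch_list
-- ===== SOURCE A (Python) =====
-- def batch_list(data, batch_size):
--     """
--     Sums data in chunks of batch_size.
--     """
--     if batch_size <= 1:
--         return data
--
--     batched_data = []
--     for i in range(0, len(data), batch_size):
--         chunk = data[i:i + batch_size]
--         if len(chunk) == batch_size:
--             batched_data.append(sum(chunk))
--
--     return batched_data
-- ===== SOURCE B (Python) =====
-- def batch_list(data, batch_size):
--     """
--     Sums data in chunks of batch_size.
--     """
--     if batch_size <= 1: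
--         return data
--     if batch_size > len(data):
--         return []  # no complete group possible
--     return [sum(group) for group in zip(*[iter(data)] * batch_size)]
-- ===== Notes on version B (the rewrite author's own statement) =====
-- stated objective: idiomatic
-- what changed: Replaces the explicit index/slice loop with the standard grouper idiom (one shared iterator zipped with itself), consuming the list sequentially into fixed-size tuples that naturally drop the incomplete trailing group.
import Mathlib
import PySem

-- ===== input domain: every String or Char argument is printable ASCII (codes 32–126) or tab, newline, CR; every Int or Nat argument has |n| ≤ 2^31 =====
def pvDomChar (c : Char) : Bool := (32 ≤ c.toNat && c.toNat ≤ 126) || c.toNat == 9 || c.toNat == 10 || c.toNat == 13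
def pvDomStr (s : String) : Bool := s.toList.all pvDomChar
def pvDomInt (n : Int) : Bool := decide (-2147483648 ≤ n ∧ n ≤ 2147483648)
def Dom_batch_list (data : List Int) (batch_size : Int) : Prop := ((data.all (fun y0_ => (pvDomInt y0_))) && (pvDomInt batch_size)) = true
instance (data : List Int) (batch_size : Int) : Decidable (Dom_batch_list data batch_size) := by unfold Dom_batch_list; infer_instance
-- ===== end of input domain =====

-- B replaces A's index/slice loop by sequential fixed-size grouping (the grouper idiom); same O(n) cost, more idiomatic.

-- ===== PORT A =====
-- Literal transliteration of A: loop i over range(0, len(data), batch_size), slice, keep sums of full chunks.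
def batch_list (data : List Int) (batch_size : Int) : List Int :=
  if batch_size ≤ 1 then data
  else
    (PySem.List.pyRange 0 (data.length : Int) batch_size).foldl
      (fun batched_data i =>
        let chunk := PySem.List.slice data (some i) (some (i + batch_size))
        if (chunk.length : Int) = batch_size then batched_data ++ [chunk.sum] else batched_data)
      []

-- ===== PORT B =====
-- Sequential grouping: consume batch_size elements at a time (the zip-of-one-iterator grouper),
-- dropping the incomplete trailing group. The `bs = 0` guard only makes the recursion total; B never hits it.
def sumGroups (bs : Nat) (l : List Int) : List Int :=
  if bs = 0 ∨ l.length < bs then []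
  else (l.take bs).sum :: sumGroups bs (l.drop bs)
  termination_by l.length
  decreasing_by
    simp only [List.length_drop]
    omega

def batch_list_alt (data : List Int) (batch_size : Int) : List Int :=
  if batch_size ≤ 1 then data
  else sumGroups batch_size.toNat data

-- ===== PRECONDITION & SPEC =====
def Spec_batch_list (data : List Int) (batch_size : Int) (out : List Int) : Prop := out = batch_list_alt data batch_size
instance (data : List Int) (batch_size : Int) (out : List Int) : Decidable (Spec_batch_list data batch_size out) := by unfold Spec_batch_list; infer_instance

-- ===== CLAIM (what is proved, stated in full; the proofs are below) =====
def Claim_equal_batch_list : Prop := ∀ (data : List Int) (batch_size : Int), Dom_batch_list data batch_size → Spec_batch_list data batch_size (batch_list data batch_size)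

-- ===== LEMMAS AND PROOFS =====

-- fold with conditional append = filter-then-map
lemma foldl_append_ite {α : Type} (p : α → Prop) [DecidablePred p] (f : α → Int) :
    ∀ (l : List α) (acc : List Int),
      l.foldl (fun acc i => if p i then acc ++ [f i] else acc) acc
        = acc ++ (l.filter (fun i => decide (p i))).map f := by
  intro l
  induction l with
  | nil => simp
  | cons x xs ih =>
    intro acc
    by_cases hx : p x <;> simp [List.foldl_cons, hx, ih]

lemma filter_range_lt (m c : Nat) (h : m ≤ c) :
    (List.range c).filter (fun k => decide (k < m)) = List.range m := by
  induction c with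
  | zero =>
    have : m = 0 := by omega
    simp [this]
  | succ c ih =>
    by_cases hm : m ≤ c
    · rw [List.range_succ, List.filter_append, ih hm]
      have : ¬ c < m := by omega
      simp [this]
    · have hmc : m = c + 1 := by omega
      subst hmc
      apply List.filter_eq_self.mpr
      intro a ha
      simp only [List.mem_range] at ha
      simp [ha]

-- A's loop in closed form: one summed chunk per k < ⌊n / bs⌋.
lemma A_closed (data : List Int) (bs : Nat) (hbs : 1 ≤ bs) :
    (PySem.List.pyRange 0 (data.length : Int) ((bs : Nat) : Int)).foldl
      (fun batched_data i =>
        if ((PySem.List.slice data (some i) (some (i + ((bs : Nat) : Int)))).length : Int) = ((bs : Nat) : Int)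
        then batched_data ++ [(PySem.List.slice data (some i) (some (i + ((bs : Nat) : Int)))).sum]
        else batched_data)
      []
    = (List.range (data.length / bs)).map (fun k => ((data.drop (bs * k)).take bs).sum) := by
  have hbs' : (0 : Int) < (bs : Int) := by exact_mod_cast hbs
  rw [PySem.List.pyRange_of_pos 0 (data.length : Int) hbs', List.foldl_map]
  have hslice : ∀ k : Nat,
      PySem.List.slice data (some ((0 : Int) + (bs : Int) * (k : Nat))) (some ((0 : Int) + (bs : Int) * (k : Nat) + (bs : Int)))
        = (data.drop (bs * k)).take bs := by
    intro k
    have h1 : ((0 : Int) + (bs : Int) * (k : Nat)) = ((bs * k : Nat) : Int) := by push_cast; ring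
    rw [h1]
    exact PySem.List.slice_natCast_add data (bs * k) bs
  simp only [hslice]
  refine (foldl_append_ite
      (fun k : Nat => (((data.drop (bs * k)).take bs).length : Int) = ((bs : Nat) : Int))
      (fun k : Nat => ((data.drop (bs * k)).take bs).sum) _ []).trans ?_
  rw [List.nil_append]
  have hcond : ∀ k : Nat,
      (((data.drop (bs * k)).take bs).length : Int) = ((bs : Nat) : Int) ↔ k < data.length / bs := by
    intro k
    have hlen : ((data.drop (bs * k)).take bs).length = min bs (data.length - bs * k) := by
      simp [List.length_take, List.length_drop]
    rw [hlen]
    have hdiv : k < data.length / bs ↔ k + 1 ≤ data.length / bs := by omega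
    rw [hdiv, Nat.le_div_iff_mul_le (by omega : 0 < bs)]
    have hmul : (k + 1) * bs = bs * k + bs := by ring
    rw [hmul]
    constructor
    · intro h
      have h' : min bs (data.length - bs * k) = bs := by exact_mod_cast h
      omega
    · intro h
      have h' : min bs (data.length - bs * k) = bs := by omega
      exact_mod_cast congrArg (Nat.cast : Nat → Int) h'
  have hcong : ∀ k ∈ List.range (if (0 : Int) < (data.length : Int) then (((data.length : Int) - 0 + (bs : Int) - 1) / (bs : Int)).toNat else 0),
      decide ((((data.drop (bs * k)).take bs).length : Int) = ((bs : Nat) : Int)) = decide (k < data.length / bs) := by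
    intro k _
    exact decide_eq_decide.mpr (hcond k)
  rw [List.filter_congr hcong, filter_range_lt]
  -- coverage: ⌊n / bs⌋ ≤ count of the python range
  by_cases hn0 : (0 : Int) < (data.length : Int)
  · rw [if_pos hn0]
    have hle : ((data.length / bs : Nat) : Int) ≤ ((data.length : Int) - 0 + (bs : Int) - 1) / (bs : Int) := by
      rw [Int.le_ediv_iff_mul_le hbs']
      have h1 : (data.length / bs) * bs ≤ data.length := Nat.div_mul_le_self data.length bs
      have h2 : ((data.length / bs : Nat) : Int) * (bs : Int) ≤ (data.length : Int) := by exact_mod_cast h1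
      omega
    omega
  · rw [if_neg hn0]
    have : data.length = 0 := by omega
    simp [this]

-- B in the same closed form.
lemma B_closed (bs : Nat) (hbs : 1 ≤ bs) (data : List Int) :
    sumGroups bs data = (List.range (data.length / bs)).map (fun k => ((data.drop (bs * k)).take bs).sum) := by
  rw [sumGroups]
  split
  · rename_i h
    have hlt : data.length < bs := by omega
    have : data.length / bs = 0 := Nat.div_eq_of_lt hlt
    simp [this]
  · rename_i h
    push Not at h
    have hle : bs ≤ data.length := h.2
    have hdiv : data.length / bs = (data.length - bs) / bs + 1 :=
      Nat.div_eq_sub_div (by omega) hle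
    rw [hdiv, List.range_succ_eq_map, List.map_cons, List.map_map]
    have ih := B_closed bs hbs (data.drop bs)
    rw [ih]
    simp only [List.length_drop]
    refine congrArg₂ List.cons ?_ ?_
    · simp
    · apply List.map_congr_left
      intro k _
      simp only [Function.comp, List.drop_drop]
      have : bs * (k + 1) = bs * k + bs := by ring
      rw [Nat.succ_eq_add_one, this, Nat.add_comm bs (bs * k)]
  termination_by data.length
  decreasing_by
    simp only [List.length_drop]
    omega

-- ===== VERDICT (by name: the statement is the Claim_ definition above) =====
theorem batch_list_spec : Claim_equal_batch_list := by
  intro data batch_size _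
  unfold Spec_batch_list batch_list batch_list_alt
  by_cases hb : batch_size ≤ 1
  · simp [hb]
  · simp only [hb, if_false]
    have hpos : 0 ≤ batch_size := by omega
    have hbs : 1 ≤ batch_size.toNat := by omega
    have hcast : batch_size = ((batch_size.toNat : Nat) : Int) := (Int.toNat_of_nonneg hpos).symm
    rw [hcast, Int.toNat_natCast]
    exact (A_closed data batch_size.toNat hbs).trans (B_closed batch_size.toNat hbs data).symm
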